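-- pv_equiv track=rewrite | github.com/LinfuYang/GA_HD | GA/kernal/func_ND.py | f
-- ===== SOURCE A (Python) =====
-- def f(x):
--
--     f = 0
--     for i in range(len(x)):
--         temp = 0
--         for j in range(i):
--             temp += x[j]
--         f += temp ** 2
--     return -f
-- ===== SOURCE B (Python) =====
-- def f(x):
--     total = 0
--     acc = 0
--     for v in x:
--         total += acc * acc
--         acc += v
--     return -total
-- ===== Notes on version B (the rewrite author's own statement) =====
-- stated objective: faster
-- what changed: Replaced the quadratic recomputation of each prefix sum by a single pass that maintains a running prefix sum and accumulates its square incrementally.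
import Mathlib
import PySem

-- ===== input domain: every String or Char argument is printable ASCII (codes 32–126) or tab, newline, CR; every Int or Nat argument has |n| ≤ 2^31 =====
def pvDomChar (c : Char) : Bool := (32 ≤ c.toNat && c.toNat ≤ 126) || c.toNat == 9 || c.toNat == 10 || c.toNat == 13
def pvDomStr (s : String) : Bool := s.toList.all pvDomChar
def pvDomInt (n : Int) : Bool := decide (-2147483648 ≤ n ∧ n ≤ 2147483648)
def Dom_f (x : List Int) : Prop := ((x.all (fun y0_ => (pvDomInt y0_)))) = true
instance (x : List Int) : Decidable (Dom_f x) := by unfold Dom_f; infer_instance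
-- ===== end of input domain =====

-- B is a one-pass running-prefix-sum rewrite of A's quadratic double loop; equal return values on all inputs.

-- ===== PORT A =====
def f (x : List Int) : Int :=
  let fv := (PySem.List.pyRange 0 (x.length : Int) 1).foldl (fun acc i =>
    let temp := (PySem.List.pyRange 0 i 1).foldl (fun t j => t + PySem.List.pyGetD x j 0) 0
    acc + temp ^ 2) 0;
  -fv

-- ===== PORT B =====
def f_alt (x : List Int) : Int :=
  let p := x.foldl (fun (s : Int × Int) v => (s.1 + s.2 * s.2, s.2 + v)) (0, 0);
  -p.1

-- ===== PRECONDITION & SPEC =====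
def Spec_f (x : List Int) (out : Int) : Prop := out = f_alt x
instance (x : List Int) (out : Int) : Decidable (Spec_f x out) := by unfold Spec_f; infer_instance

-- ===== CLAIM (what is proved, stated in full; the proofs are below) =====
def Claim_equal_f : Prop := ∀ (x : List Int), Dom_f x → Spec_f x (f x)

-- ===== LEMMAS AND PROOFS =====

/-- Reference recursion: g a xs = Σ over prefixes, squaring the running sum started at a. -/
def g (a : Int) : List Int → Int
  | [] => 0
  | v :: xs => a ^ 2 + g (a + v) xs

theorem g_append (xs : List Int) : ∀ (a v : Int), g a (xs ++ [v]) = g a xs + (a + xs.sum) ^ 2 := by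
  induction xs with
  | nil => intro a v; simp [g]
  | cons w ys ih =>
      intro a v
      simp only [List.cons_append, g, ih, List.sum_cons]
      ring

/-- A's inner loop computes the sum of the first i elements. -/
theorem inner_eq (x : List Int) (i : Nat) (hi : i ≤ x.length) :
    (PySem.List.pyRange 0 (i : Int) 1).foldl (fun t j => t + PySem.List.pyGetD x j 0) 0
      = (x.take i).sum := by
  induction i with
  | zero => simp [PySem.List.pyRange_one_eq_nil]
  | succ k ih =>
      have hk : (k : Int) ≤ (k : Int) + 1 := by omega
      have : ((k + 1 : Nat) : Int) = (k : Int) + 1 := by push_cast; ring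
      rw [this, PySem.List.pyRange_one_succ_right (by omega : (0:Int) ≤ (k:Int)) ,
          List.foldl_append, ih (by omega)]
      simp only [List.foldl_cons, List.foldl_nil]
      have hlt : k < x.length := by omega
      rw [PySem.List.pyGetD_eq_getElem x 0 (by omega) (by exact_mod_cast hlt)]
      have htn : ((k : Int)).toNat = k := Int.toNat_natCast k
      simp only [htn]
      rw [List.sum_take_succ x k hlt]

theorem outer_eq (x : List Int) : ∀ (c : Int),
    (PySem.List.pyRange 0 (x.length : Int) 1).foldl (fun acc i =>
      acc + ((PySem.List.pyRange 0 i 1).foldl (fun t j => t + PySem.List.pyGetD x j 0) 0) ^ 2) c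
      = c + g 0 x := by
  induction x using List.reverseRecOn with
  | nil => intro c; simp [g, PySem.List.pyRange_one_eq_nil]
  | append_singleton ys v ih =>
      intro c
      have hlen : ((ys ++ [v]).length : Int) = (ys.length : Int) + 1 := by
        simp
      rw [hlen, PySem.List.pyRange_one_succ_right (by positivity)]
      rw [List.foldl_append]
      have hbody :
          (PySem.List.pyRange 0 (ys.length : Int) 1).foldl (fun acc i =>
            acc + ((PySem.List.pyRange 0 i 1).foldl
              (fun t j => t + PySem.List.pyGetD (ys ++ [v]) j 0) 0) ^ 2) c
          = (PySem.List.pyRange 0 (ys.length : Int) 1).foldl (fun acc i =>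
            acc + ((PySem.List.pyRange 0 i 1).foldl
              (fun t j => t + PySem.List.pyGetD ys j 0) 0) ^ 2) c := by
        apply PySem.List.foldl_congr_mem
        intro acc i hi
        have hib := (PySem.List.mem_pyRange_one).1 hi
        have hiN : i.toNat ≤ ys.length := by omega
        have hiI : (i.toNat : Int) = i := by omega
        rw [← hiI, inner_eq (ys ++ [v]) i.toNat (by simp; omega), inner_eq ys i.toNat hiN,
            List.take_append_of_le_length hiN]
      rw [hbody, ih]
      simp only [List.foldl_cons, List.foldl_nil]
      have hinner := inner_eq (ys ++ [v]) ys.length (by simp)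
      rw [hinner, List.take_append_of_le_length (le_refl _), List.take_length,
          g_append]
      ring

theorem alt_fold (xs : List Int) : ∀ (t a : Int),
    xs.foldl (fun (s : Int × Int) v => (s.1 + s.2 * s.2, s.2 + v)) (t, a)
      = (t + g a xs, a + xs.sum) := by
  induction xs with
  | nil => intro t a; simp [g]
  | cons v ys ih =>
      intro t a
      simp only [List.foldl_cons, ih, g, List.sum_cons]
      simp only [Prod.mk.injEq]
      constructor <;> ring

-- ===== VERDICT (by name: the statement is the Claim_ definition above) =====
theorem f_spec : Claim_equal_f := by
  intro x _
  unfold Spec_f f f_alt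
  rw [outer_eq x 0, alt_fold x 0 0]
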